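-- pv_equiv track=rewrite | github.com/helifriz/test | myapp/app.py | insert_before_end
-- ===== SOURCE A (Python) =====
-- def insert_before_end(lines, start_token, end_token, new_line):
--     """Insert new_line before end_token after start_token section."""
--     in_section = False
--     for i, line in enumerate(lines):
--         if not in_section and start_token in line:
--             in_section = True
--             continue
--         if in_section and line.strip() == end_token:
--             lines.insert(i, new_line)
--             return True
--     return False
-- ===== SOURCE B (Python) =====
-- def insert_before_end(lines, start_token, end_token, new_line):
--     """Insert new_line before end_token after start_token section."""
--     starts = [i for i, l in enumerate(lines) if start_token in l]
--     ends = [i for i, l in enumerate(lines) if l.strip() == end_token]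
--     if starts and any(e > starts[0] for e in ends):
--         lines.insert(min(e for e in ends if e > starts[0]), new_line)
--         return True
--     return False
-- ===== Notes on version B (the rewrite author's own statement) =====
-- stated objective: alternative
-- what changed: Replaced A's stateful single-pass scan with an index-set formulation: materialize the lists of start-token indices and end-token indices via comprehensions, then answer by comparing the first start index against the end indices (insert at the smallest end index after it).
import Mathlib
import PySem

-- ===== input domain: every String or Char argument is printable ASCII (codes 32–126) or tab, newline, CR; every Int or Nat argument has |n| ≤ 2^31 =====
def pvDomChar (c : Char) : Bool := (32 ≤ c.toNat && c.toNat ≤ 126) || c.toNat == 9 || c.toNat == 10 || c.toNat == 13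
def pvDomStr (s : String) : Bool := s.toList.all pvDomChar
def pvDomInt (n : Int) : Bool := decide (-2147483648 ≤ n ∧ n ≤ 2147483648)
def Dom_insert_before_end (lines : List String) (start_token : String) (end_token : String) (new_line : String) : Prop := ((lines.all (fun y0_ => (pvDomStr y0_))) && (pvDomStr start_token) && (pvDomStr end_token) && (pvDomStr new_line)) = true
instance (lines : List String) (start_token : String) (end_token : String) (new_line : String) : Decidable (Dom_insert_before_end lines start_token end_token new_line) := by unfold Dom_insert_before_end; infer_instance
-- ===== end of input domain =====

-- B replaces A's stateful single-pass scan by an index-set formulation (materialize start/end index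
-- lists, compare them); same return value; both Pythons also mutate `lines` in place identically —
-- the theorems below are about the RETURN value only.

-- ===== PORT A =====
-- A's single loop over the lines with the `in_section` flag; the loop index is only used for the
-- in-place insert (a side effect, not part of the return value), so the recursion carries the flag only.
def insert_before_end_go (start_token end_token : String) : List String → Bool → Bool
  | [], _ => false
  | line :: rest, in_section =>
    if !in_section && PySem.Str.isIn start_token line then
      insert_before_end_go start_token end_token rest true
    else if in_section && (PySem.Str.strip line == end_token) then
      true
    else
      insert_before_end_go start_token end_token rest in_section

def insert_before_end (lines : List String) (start_token : String) (end_token : String) (new_line : String) : Bool :=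
  insert_before_end_go start_token end_token lines false

-- ===== PORT B =====
-- the two comprehensions build the index lists `starts` and `ends`; `starts and any(e > starts[0]
-- for e in ends)` is the returned Bool (the insert itself is a side effect, not the return value).
def insert_before_end_alt (lines : List String) (start_token : String) (end_token : String) (new_line : String) : Bool :=
  let starts := ((PySem.List.enumerate lines).filter (fun p => PySem.Str.isIn start_token p.2)).map (·.1)
  let ends := ((PySem.List.enumerate lines).filter (fun p => PySem.Str.strip p.2 == end_token)).map (·.1)
  match starts with
  | [] => false
  | s :: _ => ends.any (fun e => decide (s < e))

-- ===== PRECONDITION & SPEC =====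
def Spec_insert_before_end (lines : List String) (start_token : String) (end_token : String) (new_line : String) (out : Bool) : Prop := out = insert_before_end_alt lines start_token end_token new_line
instance (lines : List String) (start_token : String) (end_token : String) (new_line : String) (out : Bool) : Decidable (Spec_insert_before_end lines start_token end_token new_line out) := by unfold Spec_insert_before_end; infer_instance

-- ===== CLAIM =====
def Claim_equal_insert_before_end : Prop := ∀ (lines : List String) (start_token : String) (end_token : String) (new_line : String), Dom_insert_before_end lines start_token end_token new_line → Spec_insert_before_end lines start_token end_token new_line (insert_before_end lines start_token end_token new_line)

-- ===== LEMMAS AND PROOFS =====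

-- every index in a filtered enumeration starting at k is ≥ k
lemma mem_idx_ge {P : Int × String → Bool} (ls : List String) (k s : Int)
    (h : s ∈ ((PySem.List.enumerate ls k).filter P).map (·.1)) : k ≤ s := by
  simp only [List.mem_map, List.mem_filter] at h
  obtain ⟨p, ⟨hp, _⟩, rfl⟩ := h
  rw [PySem.List.mem_enumerate_iff] at hp
  obtain ⟨j, hj, rfl⟩ := hp
  simp

-- with the cutoff s strictly below the enumeration start, "any index > s" is just "any element"
lemma any_enum_gt (Q : String → Bool) (ls : List String) (k s : Int) (hk : s < k) :
    ((PySem.List.enumerate ls k).any (fun a => Q a.2 && decide (s < a.1))) = ls.any Q := by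
  induction ls generalizing k with
  | nil => simp [PySem.List.enumerate_nil]
  | cons l rest ih =>
    rw [PySem.List.enumerate_cons]
    by_cases h : Q l = true
    · simp [h, hk, ih (k + 1) (by omega)]
    · simp only [Bool.not_eq_true] at h
      simp [h, ih (k + 1) (by omega)]

-- once the flag is set, A's loop is exactly `any` of the strip-test on the rest
lemma insert_before_end_go_true (st et : String) (ls : List String) :
    insert_before_end_go st et ls true = ls.any (fun line => PySem.Str.strip line == et) := by
  induction ls with
  | nil => rfl
  | cons l rest ih =>
    simp only [insert_before_end_go, Bool.not_true, Bool.false_and, Bool.true_and,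
      List.any_cons, if_neg Bool.false_ne_true]
    by_cases h : (PySem.Str.strip l == et) = true
    · simp [h]
    · simp [h, ih]

-- with the flag unset, A's loop computes B's index-set comparison (for any enumeration start k)
lemma insert_before_end_go_false (st et : String) (ls : List String) (k : Int) :
    insert_before_end_go st et ls false =
      (match ((PySem.List.enumerate ls k).filter (fun p => PySem.Str.isIn st p.2)).map (·.1) with
       | [] => false
       | s :: _ =>
         (((PySem.List.enumerate ls k).filter (fun p => PySem.Str.strip p.2 == et)).map (·.1)).any
           (fun e => decide (s < e))) := by
  induction ls generalizing k with
  | nil => simp [PySem.List.enumerate_nil, insert_before_end_go]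
  | cons l rest ih =>
    rw [PySem.List.enumerate_cons]
    unfold insert_before_end_go
    by_cases hs : PySem.Str.isIn st l = true
    · have hs' : PySem.Chars.isIn st.toList l.toList = true := by
        unfold PySem.Str.isIn at hs; exact hs
      rw [if_pos (by simp [hs']), insert_before_end_go_true]
      by_cases he : (PySem.Str.strip l == et) = true
      · simp [hs', he, any_enum_gt (fun line => PySem.Str.strip line == et) rest (k + 1) k (by omega)]
      · simp only [Bool.not_eq_true] at he
        simp [hs', he, any_enum_gt (fun line => PySem.Str.strip line == et) rest (k + 1) k (by omega)]
    · simp only [Bool.not_eq_true] at hs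
      have hs' : PySem.Chars.isIn st.toList l.toList = false := by
        unfold PySem.Str.isIn at hs; exact hs
      rw [if_neg (by simp [hs']), if_neg (by simp), ih (k + 1)]
      cases hf : ((PySem.List.enumerate rest (k + 1)).filter (fun p => PySem.Str.isIn st p.2)).map (·.1) with
      | nil =>
        have hf' := hf
        unfold PySem.Str.isIn at hf'
        simp [hs', hf']
      | cons s tl =>
        have hks : k + 1 ≤ s := mem_idx_ge rest (k + 1) s (by rw [hf]; exact List.mem_cons_self ..)
        have hf' := hf
        unfold PySem.Str.isIn at hf'
        by_cases he : (PySem.Str.strip l == et) = true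
        · simp [hs', he, hf', show ¬ (s < k) by omega]
        · simp only [Bool.not_eq_true] at he
          simp [hs', he, hf']

-- ===== VERDICT =====
theorem insert_before_end_spec : Claim_equal_insert_before_end := by
  intro lines st et nl _
  unfold Spec_insert_before_end insert_before_end insert_before_end_alt
  exact insert_before_end_go_false st et lines 0
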